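-- pv_equiv track=rewrite | github.com/zdlawrence/MDTF-diagnostics | src/gfdl.py | _heuristic_component_tiebreaker
-- ===== SOURCE A (Python) =====
-- def _heuristic_component_tiebreaker(str_list):
--     """Determine experiment component(s) from heuristics.
--
--     1. If we're passed multiple components, select those containing 'cmip'.
--
--     2. If that selects multiple components, break the tie by selecting the
--         component with the fewest words (separated by '_'), or, failing that,
--         the shortest overall name.
--
--     Args:
--         str_list (:py:obj:`list` of :py:obj:`str`:): list of component names.
--
--     Returns: :py:obj:`str`: name of component that breaks the tie.
--     """
--     def _heuristic_tiebreaker_sub(strs):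
--         min_len = min(len(s.split('_')) for s in strs)
--         strs2 = [s for s in strs if (len(s.split('_')) == min_len)]
--         if len(strs2) == 1:
--             return strs2[0]
--         else:
--             return min(strs2, key=len)
--
--     cmip_list = [s for s in str_list if ('cmip' in s.lower())]
--     if cmip_list:
--         return _heuristic_tiebreaker_sub(cmip_list)
--     else:
--         return _heuristic_tiebreaker_sub(str_list)
-- ===== SOURCE B (Python) =====
-- def _heuristic_component_tiebreaker(str_list):
--     """Pick the component name: prefer names containing 'cmip'; among those take the
--     first name with the fewest '_'-separated words, breaking ties by shortest name —
--     selected in one pass with a running lexicographic (words, length) minimum."""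
--     candidates = [s for s in str_list if 'cmip' in s.lower()] or str_list
--     best = candidates[0]
--     best_key = (len(best.split('_')), len(best))
--     for s in candidates[1:]:
--         key = (len(s.split('_')), len(s))
--         if key < best_key:
--             best, best_key = s, key
--     return best
-- ===== Notes on version B (the rewrite author's own statement) =====
-- stated objective: simpler
-- what changed: Replaced A's three-phase helper (compute minimum word count, filter to it, then min by length) with a single left-to-right scan over the candidates that maintains a running first-minimal (word-count, length) lexicographic key.
import Mathlib
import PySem

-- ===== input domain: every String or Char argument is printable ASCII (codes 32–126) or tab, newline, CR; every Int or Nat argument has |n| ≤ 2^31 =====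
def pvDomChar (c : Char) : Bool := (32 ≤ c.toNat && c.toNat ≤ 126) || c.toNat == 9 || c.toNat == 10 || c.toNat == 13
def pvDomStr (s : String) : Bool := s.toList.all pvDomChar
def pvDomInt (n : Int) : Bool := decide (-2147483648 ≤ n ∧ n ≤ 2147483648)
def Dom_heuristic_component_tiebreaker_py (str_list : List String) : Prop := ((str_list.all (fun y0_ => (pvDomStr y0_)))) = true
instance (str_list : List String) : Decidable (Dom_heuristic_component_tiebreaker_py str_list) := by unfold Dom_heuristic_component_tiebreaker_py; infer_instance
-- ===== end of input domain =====

-- B replaces A's three-phase tie-break (min word count, filter, min by length) by one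
-- left-to-right scan keeping a running first-minimal (word-count, length) lexicographic key.


-- ===== PORT A =====
-- s.split('_')  (separator is the literal nonempty "_", so split? never returns none)
def pvWords (s : String) : List String := (PySem.Str.split? s "_").getD []

-- the inner helper _heuristic_tiebreaker_sub, step for step
def pvSubA (strs : List String) : String :=
  let min_len := (PySem.List.min? (strs.map (fun s => (pvWords s).length)) (fun x => x)).getD 0
  let strs2 := strs.filter (fun s => (pvWords s).length == min_len)
  if strs2.length == 1 then strs2.getD 0 ""
  else (PySem.List.min? strs2 (fun s => PySem.Str.len s)).getD ""

def heuristic_component_tiebreaker_py (str_list : List String) : String :=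
  let cmip_list := str_list.filter (fun s => PySem.Str.isIn "cmip" (PySem.Str.lower s))
  if cmip_list ≠ [] then pvSubA cmip_list else pvSubA str_list

-- ===== PORT B =====
def pvKey (s : String) : Nat × Int := ((pvWords s).length, PySem.Str.len s)

-- Python's tuple '<' on the (word count, length) pair
def pvKeyLt (a b : Nat × Int) : Bool := a.1 < b.1 || (a.1 == b.1 && decide (a.2 < b.2))

def heuristic_component_tiebreaker_py_alt (str_list : List String) : String :=
  let cands0 := str_list.filter (fun s => PySem.Str.isIn "cmip" (PySem.Str.lower s))
  let cands := if cands0 = [] then str_list else cands0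
  match cands with
  | [] => ""          -- unreachable under Pre_: Python B raises IndexError on []
  | b :: rest =>
    (rest.foldl (fun (acc : String × (Nat × Int)) s =>
        let k := pvKey s
        if pvKeyLt k acc.2 then (s, k) else acc) (b, pvKey b)).1

-- ===== PRECONDITION & SPEC =====
-- A raises ValueError on the empty list (min of an empty generator); B raises IndexError there.
def Pre_heuristic_component_tiebreaker_py (str_list : List String) : Prop := str_list ≠ []
instance (str_list : List String) : Decidable (Pre_heuristic_component_tiebreaker_py str_list) := by unfold Pre_heuristic_component_tiebreaker_py; infer_instance
def pvWitness_heuristic_component_tiebreaker_py : List String := ["a_cmip_x", "CMIP6", "bb"]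

def Spec_heuristic_component_tiebreaker_py (str_list : List String) (out : String) : Prop := out = heuristic_component_tiebreaker_py_alt str_list
instance (str_list : List String) (out : String) : Decidable (Spec_heuristic_component_tiebreaker_py str_list out) := by unfold Spec_heuristic_component_tiebreaker_py; infer_instance

-- ===== CLAIM (what is proved, stated in full; the proofs are below) =====
def Claim_equal_heuristic_component_tiebreaker_py : Prop := ∀ (str_list : List String), Dom_heuristic_component_tiebreaker_py str_list → Pre_heuristic_component_tiebreaker_py str_list → Spec_heuristic_component_tiebreaker_py str_list (heuristic_component_tiebreaker_py str_list)

-- ===== LEMMAS AND PROOFS =====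

-- the value of B's running-minimum fold, as a structural recursion
def pvG (b : String) (rest : List String) : String :=
  match rest with
  | [] => b
  | s :: t => if pvKeyLt (pvKey s) (pvKey b) then pvG s t else pvG b t

-- r is the first element of l with lexicographically minimal (word count, length) key
def IsFirstMin (l : List String) (r : String) : Prop :=
  (∀ y ∈ l, pvKeyLt (pvKey y) (pvKey r) = false) ∧
  ∃ u v, l = u ++ r :: v ∧ ∀ y ∈ u, pvKeyLt (pvKey r) (pvKey y) = true

theorem pvKeyLt_true_iff (a b : Nat × Int) :
    pvKeyLt a b = true ↔ (a.1 < b.1 ∨ (a.1 = b.1 ∧ a.2 < b.2)) := by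
  simp [pvKeyLt]

theorem pvKeyLt_false_iff (a b : Nat × Int) :
    pvKeyLt a b = false ↔ ¬ (a.1 < b.1 ∨ (a.1 = b.1 ∧ a.2 < b.2)) := by
  rw [← pvKeyLt_true_iff]; cases h : pvKeyLt a b <;> simp_all

theorem pvKeyLt_irrefl (a : Nat × Int) : pvKeyLt a a = false := by
  rcases a with ⟨a1, a2⟩; rw [pvKeyLt_false_iff]; omega

theorem pvKeyLt_asymm (a b : Nat × Int) (h : pvKeyLt a b = true) : pvKeyLt b a = false := by
  rcases a with ⟨a1, a2⟩; rcases b with ⟨b1, b2⟩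
  rw [pvKeyLt_true_iff] at h; rw [pvKeyLt_false_iff]; omega

-- r ≤ s < b  ⇒  r < b
theorem pvKeyLt_of_nlt_of_lt (r s b : Nat × Int) (h1 : pvKeyLt s r = false)
    (h2 : pvKeyLt s b = true) : pvKeyLt r b = true := by
  rcases r with ⟨r1, r2⟩; rcases s with ⟨s1, s2⟩; rcases b with ⟨b1, b2⟩
  rw [pvKeyLt_false_iff] at h1; rw [pvKeyLt_true_iff] at h2 ⊢; omega

-- r ≤ b ≤ s  ⇒  ¬ s < r
theorem pvKeyLt_nlt_of_nlt_of_nlt (r b s : Nat × Int) (h1 : pvKeyLt s b = false)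
    (h2 : pvKeyLt b r = false) : pvKeyLt s r = false := by
  rcases r with ⟨r1, r2⟩; rcases s with ⟨s1, s2⟩; rcases b with ⟨b1, b2⟩
  rw [pvKeyLt_false_iff] at h1 h2 ⊢; omega

-- r < b ≤ s  ⇒  r < s
theorem pvKeyLt_of_lt_of_nlt (r b s : Nat × Int) (h1 : pvKeyLt r b = true)
    (h2 : pvKeyLt s b = false) : pvKeyLt r s = true := by
  rcases r with ⟨r1, r2⟩; rcases s with ⟨s1, s2⟩; rcases b with ⟨b1, b2⟩
  rw [pvKeyLt_true_iff] at h1 ⊢; rw [pvKeyLt_false_iff] at h2; omega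

theorem pvG_cons_pos (b s : String) (t : List String)
    (h : pvKeyLt (pvKey s) (pvKey b) = true) : pvG b (s :: t) = pvG s t := by simp [pvG, h]

theorem pvG_cons_neg (b s : String) (t : List String)
    (h : pvKeyLt (pvKey s) (pvKey b) = false) : pvG b (s :: t) = pvG b t := by simp [pvG, h]

theorem pvG_isFirstMin (rest : List String) : ∀ b, IsFirstMin (b :: rest) (pvG b rest) := by
  induction rest with
  | nil =>
    intro b
    refine ⟨?_, [], [], rfl, by simp⟩
    intro y hy; simp only [List.mem_singleton] at hy; subst hy
    simp only [pvG]; exact pvKeyLt_irrefl _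
  | cons s t ih =>
    intro b
    by_cases h : pvKeyLt (pvKey s) (pvKey b) = true
    · -- s strictly improves on b
      rw [pvG_cons_pos b s t h]
      obtain ⟨hmin, u, v, hdec, hu⟩ := ih s
      have hsr : pvKeyLt (pvKey s) (pvKey (pvG s t)) = false := hmin s (by simp)
      have hrb : pvKeyLt (pvKey (pvG s t)) (pvKey b) = true := pvKeyLt_of_nlt_of_lt _ _ _ hsr h
      refine ⟨?_, b :: u, v, by rw [List.cons_append, ← hdec], ?_⟩
      · intro y hy
        rcases List.mem_cons.mp hy with rfl | hy
        · exact pvKeyLt_asymm _ _ hrb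
        · exact hmin y hy
      · intro y hy
        rcases List.mem_cons.mp hy with rfl | hy
        · exact hrb
        · exact hu y hy
    · have h' : pvKeyLt (pvKey s) (pvKey b) = false := by
        cases hh : pvKeyLt (pvKey s) (pvKey b) <;> simp_all
      rw [pvG_cons_neg b s t h']
      obtain ⟨hmin, u, v, hdec, hu⟩ := ih b
      have hbr : pvKeyLt (pvKey b) (pvKey (pvG b t)) = false := hmin b (by simp)
      refine ⟨?_, ?_⟩
      · intro y hy
        rcases List.mem_cons.mp hy with rfl | hy
        · exact hbr
        rcases List.mem_cons.mp hy with rfl | hy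
        · exact pvKeyLt_nlt_of_nlt_of_nlt _ _ _ h' hbr
        · exact hmin y (by simp [hy])
      · cases u with
        | nil =>
          simp only [List.nil_append] at hdec
          have hb : b = pvG b t := by injection hdec
          refine ⟨[], s :: t, ?_, by simp⟩
          rw [List.nil_append, ← hb]
        | cons b0 u' =>
          have hb0 : b0 = b := by injection hdec with h1 _; exact h1.symm
          subst hb0
          have ht : t = u' ++ pvG b0 t :: v := by injection hdec
          have hrb : pvKeyLt (pvKey (pvG b0 t)) (pvKey b0) = true := hu b0 (by simp)
          refine ⟨b0 :: s :: u', v, by rw [List.cons_append, List.cons_append, ← ht], ?_⟩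
          intro y hy
          rcases List.mem_cons.mp hy with rfl | hy
          · exact hrb
          rcases List.mem_cons.mp hy with rfl | hy
          · exact pvKeyLt_of_lt_of_nlt _ _ _ hrb h'
          · exact hu y (by simp [hy])

-- FIRST extremal element: PySem.List.min? returns the first element achieving the minimum
theorem min?_first {α κ : Type} [LinearOrder κ] (key : α → κ) :
    ∀ (xs : List α) (m : α), PySem.List.min? xs key = some m →
      ∃ u v, xs = u ++ m :: v ∧ ∀ y ∈ u, key m < key y := by
  have aux : ∀ (xs : List α) (a m : α),
      xs.foldl (fun acc x => match acc with
        | none => some x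
        | some mm => if key x < key mm then some x else some mm) (some a) = some m →
      (m = a) ∨ ∃ u v, xs = u ++ m :: v ∧ (∀ y ∈ u, key m < key y) ∧ key m < key a := by
    intro xs
    induction xs with
    | nil => intro a m h; left; simpa using h.symm
    | cons x t ih =>
      intro a m h
      simp only [List.foldl_cons] at h
      by_cases hx : key x < key a
      · rw [if_pos hx] at h
        rcases ih x m h with rfl | ⟨u, v, hd, hu, hlt⟩
        · right; exact ⟨[], t, rfl, by simp, hx⟩
        · right; exact ⟨x :: u, v, by simp [hd], by
            intro y hy
            rcases List.mem_cons.mp hy with rfl | hy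
            · exact hlt
            · exact hu y hy, lt_trans hlt hx⟩
      · rw [if_neg hx] at h
        rcases ih a m h with rfl | ⟨u, v, hd, hu, hlt⟩
        · left; rfl
        · right; exact ⟨x :: u, v, by simp [hd], by
            intro y hy
            rcases List.mem_cons.mp hy with rfl | hy
            · exact lt_of_lt_of_le hlt (le_of_not_gt hx)
            · exact hu y hy, hlt⟩
  intro xs m h
  cases xs with
  | nil => simp [PySem.List.min?] at h
  | cons x t =>
    have h' : t.foldl (fun acc x => match acc with
        | none => some x
        | some mm => if key x < key mm then some x else some mm) (some x) = some m := by
      simpa [PySem.List.min?] using h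
    rcases aux t x m h' with rfl | ⟨u, v, hd, hu, hlt⟩
    · exact ⟨[], t, rfl, by simp⟩
    · exact ⟨x :: u, v, by simp [hd], by
        intro y hy
        rcases List.mem_cons.mp hy with rfl | hy
        · exact hlt
        · exact hu y hy⟩

-- pull a decomposition of (l.filter p) back to l
theorem filter_split {α : Type} (p : α → Bool) :
    ∀ (l : List α) (u : List α) (r : α) (v : List α), l.filter p = u ++ r :: v →
      ∃ u' v', l = u' ++ r :: v' ∧ u'.filter p = u ∧ p r = true := by
  intro l
  induction l with
  | nil => intro u r v h; simp at h
  | cons x t ih =>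
    intro u r v h
    by_cases hx : p x = true
    · rw [List.filter_cons_of_pos hx] at h
      cases u with
      | nil =>
        simp only [List.nil_append] at h
        have hxr : x = r := by injection h
        exact ⟨[], t, by rw [List.nil_append, hxr], by simp, hxr ▸ hx⟩
      | cons u0 u' =>
        injection h with h1 h2
        subst h1
        obtain ⟨u1, v1, hd, hf, hp⟩ := ih u' r v h2
        exact ⟨x :: u1, v1, by rw [List.cons_append, ← hd], by simp [List.filter_cons_of_pos hx, hf], hp⟩
    · have hx' : p x = false := by cases hp : p x <;> simp_all
      rw [List.filter_cons_of_neg (by simp [hx'])] at h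
      obtain ⟨u1, v1, hd, hf, hp⟩ := ih u r v h
      exact ⟨x :: u1, v1, by rw [List.cons_append, ← hd], by simp [List.filter_cons_of_neg, hx', hf], hp⟩

theorem isFirstMin_unique (l : List String) (r1 r2 : String)
    (h1 : IsFirstMin l r1) (h2 : IsFirstMin l r2) : r1 = r2 := by
  obtain ⟨hmin1, u1, v1, hd1, hu1⟩ := h1
  obtain ⟨hmin2, u2, v2, hd2, hu2⟩ := h2
  rcases lt_trichotomy u1.length u2.length with hlen | hlen | hlen
  · -- r1 sits inside u2
    exfalso
    have hr1 : r1 ∈ u2 := by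
      have hget : l[u1.length]? = some r1 := by
        rw [hd1]; rw [List.getElem?_append_right (le_refl u1.length)]; simp
      have hget2 : l[u1.length]? = u2[u1.length]? := by
        rw [hd2, List.getElem?_append_left hlen]
      rw [hget] at hget2
      exact List.mem_of_getElem? hget2.symm
    have h := hu2 r1 hr1
    have h' := hmin1 r2 (by rw [hd2]; simp)
    rw [pvKeyLt_true_iff] at h
    rw [pvKeyLt_false_iff] at h'
    exact h' h
  · -- same position
    have := hd1.symm.trans hd2
    obtain ⟨-, h2⟩ := List.append_inj this hlen
    injection h2
  · exfalso
    have hr2 : r2 ∈ u1 := by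
      have hget : l[u2.length]? = some r2 := by
        rw [hd2]; rw [List.getElem?_append_right (le_refl u2.length)]; simp
      have hget2 : l[u2.length]? = u1[u2.length]? := by
        rw [hd1, List.getElem?_append_left hlen]
      rw [hget] at hget2
      exact List.mem_of_getElem? hget2.symm
    have h := hu1 r2 hr2
    have h' := hmin2 r1 (by rw [hd1]; simp)
    rw [pvKeyLt_true_iff] at h
    rw [pvKeyLt_false_iff] at h'
    exact h' h

theorem pvSubA_isFirstMin (l : List String) (hne : l ≠ []) : IsFirstMin l (pvSubA l) := by
  obtain ⟨W, hW⟩ : ∃ W, PySem.List.min? (l.map (fun s => (pvWords s).length)) (fun x => x) = some W := by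
    cases hc : PySem.List.min? (l.map (fun s => (pvWords s).length)) (fun x => x) with
    | none => rw [PySem.List.min?_eq_none_iff, List.map_eq_nil_iff] at hc; exact absurd hc hne
    | some w => exact ⟨w, rfl⟩
  have hWmin : ∀ s ∈ l, W ≤ (pvWords s).length := by
    intro s hs
    exact PySem.List.min?_isMin hW _ (List.mem_map_of_mem hs)
  obtain ⟨m, hm⟩ : ∃ m, PySem.List.min? (l.filter (fun s => (pvWords s).length == W))
      (fun s => PySem.Str.len s) = some m := by
    cases hc : PySem.List.min? (l.filter (fun s => (pvWords s).length == W)) (fun s => PySem.Str.len s) with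
    | none =>
      rw [PySem.List.min?_eq_none_iff] at hc
      obtain ⟨s, hs, hws⟩ := List.mem_map.mp (PySem.List.min?_mem hW)
      have : s ∈ l.filter (fun s => (pvWords s).length == W) := by
        rw [List.mem_filter]
        exact ⟨hs, by simp [hws]⟩
      rw [hc] at this; simp at this
    | some x => exact ⟨x, rfl⟩
  have hmm : m ∈ l.filter (fun s => (pvWords s).length == W) := PySem.List.min?_mem hm
  have hmW : (pvWords m).length = W := by
    have := (List.mem_filter.mp hmm).2; simpa using this
  have hml : m ∈ l := (List.mem_filter.mp hmm).1
  have hmlen : ∀ y ∈ l.filter (fun s => (pvWords s).length == W),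
      PySem.Str.len m ≤ PySem.Str.len y := PySem.List.min?_isMin hm
  -- pvSubA l = m in both branches of the if
  have hsubA : pvSubA l = m := by
    unfold pvSubA
    simp only [hW, Option.getD_some, hm]
    by_cases hlen : (l.filter (fun s => (pvWords s).length == W)).length == 1
    · rw [if_pos hlen]
      obtain ⟨x, hx⟩ := List.length_eq_one_iff.mp (by simpa using hlen)
      rw [hx] at hm ⊢
      have : m = x := by simpa [PySem.List.min?] using hm.symm
      simp [this]
    · rw [if_neg hlen]
  rw [hsubA]
  constructor
  · -- m is lexicographically minimal in l
    intro y hy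
    rw [pvKeyLt_false_iff]
    rintro (h1 | ⟨h1, h2⟩)
    · simp only [pvKey, hmW] at h1
      exact absurd h1 (by have := hWmin y hy; omega)
    · simp only [pvKey, hmW] at h1 h2
      have hyf : y ∈ l.filter (fun s => (pvWords s).length == W) := by
        rw [List.mem_filter]; exact ⟨hy, by simp [h1]⟩
      exact absurd h2 (by have := hmlen y hyf; omega)
  · -- m is the FIRST such element
    obtain ⟨u, v, hdec, hu⟩ := min?_first (fun s => PySem.Str.len s) _ m hm
    obtain ⟨u', v', hdec', hf, hpm⟩ := filter_split _ l u m v hdec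
    refine ⟨u', v', hdec', ?_⟩
    intro y hy
    rw [pvKeyLt_true_iff]
    by_cases hp : ((pvWords y).length == W) = true
    · have hyu : y ∈ u := by rw [← hf, List.mem_filter]; exact ⟨hy, hp⟩
      right
      refine ⟨by simp_all [pvKey], ?_⟩
      simpa [pvKey] using hu y hyu
    · left
      have hyl : y ∈ l := by rw [hdec']; exact List.mem_append.mpr (Or.inl hy)
      have h1 := hWmin y hyl
      have h2 : (pvWords y).length ≠ W := by simpa using hp
      simp only [pvKey, hmW]; omega

theorem pvSubA_eq_pvG (b : String) (rest : List String) :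
    pvSubA (b :: rest) = pvG b rest :=
  isFirstMin_unique _ _ _ (pvSubA_isFirstMin _ (by simp)) (pvG_isFirstMin rest b)

theorem foldl_eq_pvG (rest : List String) : ∀ b,
    (rest.foldl (fun (acc : String × (Nat × Int)) s =>
        let k := pvKey s
        if pvKeyLt k acc.2 then (s, k) else acc) (b, pvKey b)) = (pvG b rest, pvKey (pvG b rest)) := by
  induction rest with
  | nil => intro b; simp [pvG]
  | cons s t ih =>
    intro b
    simp only [List.foldl_cons, pvG]
    by_cases h : pvKeyLt (pvKey s) (pvKey b) = true
    · simp [h, ih s]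
    · have h' : pvKeyLt (pvKey s) (pvKey b) = false := by cases hh : pvKeyLt (pvKey s) (pvKey b) <;> simp_all
      simp [h', ih b]

-- ===== VERDICT (by name: the statement is the Claim_ definition above) =====
theorem heuristic_component_tiebreaker_py_spec : Claim_equal_heuristic_component_tiebreaker_py := by
  intro l _ hpre
  unfold Spec_heuristic_component_tiebreaker_py
  unfold heuristic_component_tiebreaker_py heuristic_component_tiebreaker_py_alt
  simp only []
  by_cases hc : l.filter (fun s => PySem.Str.isIn "cmip" (PySem.Str.lower s)) = []
  · rw [if_neg (not_not_intro hc), if_pos hc]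
    cases l with
    | nil => exact absurd rfl hpre
    | cons b rest => simp only [foldl_eq_pvG]; exact pvSubA_eq_pvG b rest
  · rw [if_pos hc, if_neg hc]
    rcases hl : l.filter (fun s => PySem.Str.isIn "cmip" (PySem.Str.lower s)) with _ | ⟨b, rest⟩
    · exact absurd hl hc
    · simp only [foldl_eq_pvG]; exact pvSubA_eq_pvG b rest
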